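-- pv_equiv track=rewrite | github.com/superhac/vpinfe | common/vpxparser.py | stripVBScriptComments
-- ===== SOURCE A (Python) =====
-- def stripVBScriptComments(script):
--     lines = []
--     for line in script.splitlines():
--         code = []
--         in_string = False
--         i = 0
--         while i < len(line):
--             char = line[i]
--             if char == '"':
--                 code.append(char)
--                 if in_string and i + 1 < len(line) and line[i + 1] == '"':
--                     code.append(line[i + 1])
--                     i += 2
--                     continue
--                 in_string = not in_string
--             elif char == "'" and not in_string:
--                 break
--             else:
--                 code.append(char)
--             i += 1
--         lines.append("".join(code))
--     return "\n".join(lines)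
-- ===== SOURCE B (Python) =====
-- def stripVBScriptComments(script):
--     out = []
--     for line in script.splitlines():
--         n = len(line)
--         cut = n
--         i = 0
--         while i < n:
--             c = line[i]
--             if c == "'":
--                 cut = i
--                 break
--             if c == '"':
--                 # consume a whole string literal (doubled "" is an escape)
--                 i += 1
--                 while i < n:
--                     if line[i] == '"':
--                         if i + 1 < n and line[i + 1] == '"':
--                             i += 2
--                         else:
--                             i += 1
--                             break
--                     else:
--                         i += 1
--             else:
--                 i += 1
--         out.append(line[:cut])
--     return "\n".join(out)
-- ===== Notes on version B (the rewrite author's own statement) =====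
-- stated objective: faster
-- what changed: Replaces A's char-copying state machine (in_string flag, per-char list appends, final join) by a scanner that only finds the comment cut index - an outer loop handing whole string literals to a nested literal-consuming loop - and slices each line once.
import Mathlib
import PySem

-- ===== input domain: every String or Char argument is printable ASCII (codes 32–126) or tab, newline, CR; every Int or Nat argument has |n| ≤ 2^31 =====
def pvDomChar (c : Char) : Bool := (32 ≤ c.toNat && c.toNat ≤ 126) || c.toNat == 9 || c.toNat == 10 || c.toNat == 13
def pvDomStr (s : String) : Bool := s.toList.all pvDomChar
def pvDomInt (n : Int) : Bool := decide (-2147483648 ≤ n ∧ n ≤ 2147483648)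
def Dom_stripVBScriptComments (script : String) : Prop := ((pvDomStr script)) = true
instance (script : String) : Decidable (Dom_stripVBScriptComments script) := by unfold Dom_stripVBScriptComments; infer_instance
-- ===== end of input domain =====

-- B replaces A's char-copying in_string state machine by a cut-index scanner with a nested
-- string-literal consumer plus a single slice per cs (objective: simpler; same return value).

-- ===== PORT A =====
-- A's while loop: index i, in_string flag, 'code' accumulator of copied chars.
def pvALoop (cs : List Char) (code : List Char) (inStr : Bool) (i : Nat) : List Char :=
  if h : i < cs.length then
    let c := cs[i]
    if c = '"' then
      if inStr = true ∧ i + 1 < cs.length ∧ cs.getD (i + 1) ' ' = '"' then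
        pvALoop cs (code ++ [c, cs.getD (i + 1) ' ']) inStr (i + 2)
      else
        pvALoop cs (code ++ [c]) (!inStr) (i + 1)
    else if c = '\'' ∧ inStr = false then
      code
    else
      pvALoop cs (code ++ [c]) inStr (i + 1)
  else code
termination_by cs.length - i

def stripVBScriptComments (script : String) : String :=
  PySem.Str.join "\n"
    ((PySem.Str.splitlines script).map (fun cs => String.ofList (pvALoop cs.toList [] false 0)))

-- ===== PORT B =====
-- B's inner while loop: consume the body of a string literal starting at i, return the index after it.
def pvBLit (cs : List Char) (i : Nat) : Nat :=
  if h : i < cs.length then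
    if cs[i] = '"' then
      if i + 1 < cs.length ∧ cs.getD (i + 1) ' ' = '"' then pvBLit cs (i + 2)
      else i + 1
    else pvBLit cs (i + 1)
  else i
termination_by cs.length - i

-- needed by pvBCut's decreasing_by: the literal consumer never moves backwards
theorem le_pvBLit (cs : List Char) (i : Nat) : i ≤ pvBLit cs i := by
  rw [pvBLit]
  split
  · split
    · split
      · exact le_trans (by omega) (le_pvBLit cs (i + 2))
      · omega
    · exact le_trans (by omega) (le_pvBLit cs (i + 1))
  · exact le_rfl
termination_by cs.length - i

-- B's outer while loop: return the cut index (start of the comment, or len cs).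
def pvBCut (cs : List Char) (i : Nat) : Nat :=
  if h : i < cs.length then
    if cs[i] = '\'' then i
    else if cs[i] = '"' then pvBCut cs (pvBLit cs (i + 1))
    else pvBCut cs (i + 1)
  else cs.length
termination_by cs.length - i
decreasing_by
  · have := le_pvBLit cs (i + 1); omega
  · omega

def stripVBScriptComments_alt (script : String) : String :=
  PySem.Str.join "\n"
    ((PySem.Str.splitlines script).map
      (fun cs => String.ofList (cs.toList.take (pvBCut cs.toList 0))))

-- ===== PRECONDITION & SPEC =====
def Spec_stripVBScriptComments (script : String) (out : String) : Prop := out = stripVBScriptComments_alt script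
instance (script : String) (out : String) : Decidable (Spec_stripVBScriptComments script out) := by unfold Spec_stripVBScriptComments; infer_instance

-- ===== CLAIM (what is proved, stated in full; the proofs are below) =====
def Claim_equal_stripVBScriptComments : Prop := ∀ (script : String), Dom_stripVBScriptComments script → Spec_stripVBScriptComments script (stripVBScriptComments script)

-- ===== LEMMAS AND PROOFS =====

theorem pvBLit_le (cs : List Char) (i : Nat) (h : i ≤ cs.length) :
    pvBLit cs i ≤ cs.length := by
  rw [pvBLit]
  split
  · split
    · split
      · exact pvBLit_le cs (i + 2) (by rename_i h1 h2 h3; omega)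
      · rename_i h1 _ _; omega
    · exact pvBLit_le cs (i + 1) (by rename_i h1 _; omega)
  · exact h
termination_by cs.length - i

theorem pvBCut_le (cs : List Char) (i : Nat) : pvBCut cs i ≤ cs.length := by
  rw [pvBCut]
  split
  · split
    · omega
    · split
      · exact pvBCut_le cs (pvBLit cs (i + 1))
      · exact pvBCut_le cs (i + 1)
  · exact le_rfl
termination_by cs.length - i
decreasing_by
  all_goals (have := le_pvBLit cs (i + 1); omega)

theorem i_le_pvBCut (cs : List Char) (i : Nat) (h : i ≤ cs.length) : i ≤ pvBCut cs i := by
  rw [pvBCut]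
  split
  · split
    · exact le_rfl
    · split
      · have h1 := le_pvBLit cs (i + 1)
        exact le_trans (by omega) (i_le_pvBCut cs (pvBLit cs (i + 1))
          (pvBLit_le cs (i + 1) (by rename_i hlt _ _; omega)))
      · exact le_trans (by omega) (i_le_pvBCut cs (i + 1) (by rename_i hlt _ _; omega))
  · exact h
termination_by cs.length - i
decreasing_by
  all_goals (have := le_pvBLit cs (i + 1); omega)

-- A's loop in the in-string state copies exactly up to the literal's end and hands back to the out-of-string scan.
theorem pvALoop_true (cs : List Char) (i : Nat) (code : List Char) (h : i ≤ cs.length) :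
    pvALoop cs code true i =
      pvALoop cs (code ++ (cs.drop i).take (pvBLit cs i - i)) false (pvBLit cs i) := by
  rw [pvALoop, pvBLit]
  split_ifs with h1 h2 h3 h4 h5 h6
  · -- doubled quote inside the string
    have hlt2 : i + 1 < cs.length := h4.1
    have hg : cs.getD (i + 1) ' ' = cs[i + 1] := List.getD_eq_getElem cs ' ' hlt2
    have hx := le_pvBLit cs (i + 2)
    simp only [if_pos h3]
    rw [pvALoop_true cs (i + 2) _ (by omega)]
    rw [List.append_assoc]
    congr 1
    rw [List.drop_eq_getElem_cons h1, List.drop_eq_getElem_cons hlt2]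
    have e : pvBLit cs (i + 2) - i = (pvBLit cs (i + 2) - (i + 2)) + 1 + 1 := by omega
    rw [e, List.take_succ_cons, List.take_succ_cons, hg]
    simp [h3]
  · exact absurd h2.2 h4
  · -- ordinary char inside the string
    have hx := le_pvBLit cs (i + 1)
    simp only [if_neg h3, and_false, if_false]
    rw [pvALoop_true cs (i + 1) _ (by omega)]
    rw [List.append_assoc]
    congr 1
    rw [List.drop_eq_getElem_cons h1]
    have e : pvBLit cs (i + 1) - i = (pvBLit cs (i + 1) - (i + 1)) + 1 := by omega
    rw [e, List.take_succ_cons]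
    simp
  · exact absurd ⟨rfl, h6⟩ h2
  · -- closing quote
    simp only [if_pos h5, Bool.not_true]
    congr 1
    rw [List.drop_eq_getElem_cons h1]
    have e : i + 1 - i = 1 := by omega
    rw [e]
    simp [h5]
  · -- ordinary char inside the string (doubled-quote test false)
    have hx := le_pvBLit cs (i + 1)
    simp only [if_neg h5, and_false, if_false]
    rw [pvALoop_true cs (i + 1) _ (by omega)]
    rw [List.append_assoc]
    congr 1
    rw [List.drop_eq_getElem_cons h1]
    have e : pvBLit cs (i + 1) - i = (pvBLit cs (i + 1) - (i + 1)) + 1 := by omega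
    rw [e, List.take_succ_cons]
    simp
  · rw [pvALoop]
    have hnil : cs.drop i = [] := List.drop_eq_nil_of_le (by omega)
    simp [hnil, h1]
termination_by cs.length - i
theorem pvALoop_false (cs : List Char) (i : Nat) (code : List Char) (h : i ≤ cs.length) :
    pvALoop cs code false i = code ++ (cs.drop i).take (pvBCut cs i - i) := by
  rw [pvALoop, pvBCut]
  split_ifs with h1 h2 h3 h4 h5 h6
  · exact h2.1.elim
  · exact h2.1.elim
  · exact h2.1.elim
  · -- comment start: stop copying
    have hne : cs[i] ≠ '"' := by rw [h5]; decide
    simp only [if_neg hne, and_true, if_pos h5]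
    simp
  · -- opening quote: enter the string literal
    have hj1 : i + 1 ≤ pvBLit cs (i + 1) := le_pvBLit cs (i + 1)
    have hjle : pvBLit cs (i + 1) ≤ cs.length := pvBLit_le cs (i + 1) (by omega)
    have hjc : pvBLit cs (i + 1) ≤ pvBCut cs (pvBLit cs (i + 1)) := i_le_pvBCut cs _ hjle
    simp only [if_pos h6, Bool.not_false]
    rw [pvALoop_true cs (i + 1) _ (by omega)]
    rw [pvALoop_false cs (pvBLit cs (i + 1)) _ hjle]
    rw [List.append_assoc, List.append_assoc]
    congr 1
    rw [List.drop_eq_getElem_cons h1]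
    have e : pvBCut cs (pvBLit cs (i + 1)) - i =
        ((pvBLit cs (i + 1) - (i + 1)) + (pvBCut cs (pvBLit cs (i + 1)) - pvBLit cs (i + 1))) + 1 := by
      omega
    rw [e, List.take_succ_cons, List.take_add, List.drop_drop]
    have e2 : i + 1 + (pvBLit cs (i + 1) - (i + 1)) = pvBLit cs (i + 1) := by omega
    rw [e2]
    simp
  · -- ordinary char outside any string
    have hc1 : i + 1 ≤ pvBCut cs (i + 1) := i_le_pvBCut cs (i + 1) (by omega)
    simp only [if_neg h6, and_true, if_neg h5]
    rw [pvALoop_false cs (i + 1) _ (by omega)]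
    rw [List.append_assoc]
    congr 1
    rw [List.drop_eq_getElem_cons h1]
    have e : pvBCut cs (i + 1) - i = (pvBCut cs (i + 1) - (i + 1)) + 1 := by omega
    rw [e, List.take_succ_cons]
    simp
  · have hnil : cs.drop i = [] := List.drop_eq_nil_of_le (by omega)
    simp [hnil]
termination_by cs.length - i
decreasing_by
  all_goals (have := le_pvBLit cs (i + 1); omega)

theorem perLine_eq (cs : List Char) :
    pvALoop cs [] false 0 = cs.take (pvBCut cs 0) := by
  rw [pvALoop_false cs 0 [] (Nat.zero_le _)]
  simp

-- ===== VERDICT (by name: the statement is the Claim_ definition above) =====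
theorem stripVBScriptComments_spec : Claim_equal_stripVBScriptComments := by
  intro script _
  unfold Spec_stripVBScriptComments stripVBScriptComments stripVBScriptComments_alt
  congr 1
  apply List.map_congr_left
  intro cs _
  rw [perLine_eq]
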